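-- pv_equiv track=rewrite | github.com/CookiePPP/pngnw_bert | pngnwbert/transformers_bert/tokenization_bert.py | split_arpa
-- ===== SOURCE A (Python) =====
-- def split_arpa(text):
--     # "{DH IH1 S} {W AA1 Z}, {N OW1 T AH0 B AH0 L}."
--     # to ["{DH IH1 S}", "{W AA1 Z},", "{N OW1 T AH0 B AH0 L}."]
--     split_text = []
--     is_in_bracket = 0
--     last_index = 0
--     for i, char in enumerate(text):
--         if char == "{":
--             is_in_bracket += 1
--         elif char == "}":
--             is_in_bracket -= 1
--         elif char == " " and not is_in_bracket:
--             split_text.append(text[last_index:i].replace('{', '').replace('}', '').strip())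
--             last_index = i
--     split_text.append(text[last_index:].replace('{', '').replace('}', '').strip())
--     return split_text
-- ===== SOURCE B (Python) =====
-- def split_arpa(text):
--     # Split on ' ' first, then regroup parts with a running bracket depth;
--     # flush a group whenever the depth returns to 0, and flush the remainder.
--     split_text = []
--     group = []
--     depth = 0
--     for part in text.split(' '):
--         group.append(part)
--         depth += part.count('{') - part.count('}')
--         if depth == 0:
--             split_text.append(' '.join(group).replace('{', '').replace('}', '').strip())
--             group = []
--     if group:
--         split_text.append(' '.join(group).replace('{', '').replace('}', '').strip())
--     return split_text
-- ===== Notes on version B (the rewrite author's own statement) =====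
-- stated objective: alternative
-- what changed: B splits the text on every space up front (one C-level str.split) and regroups the parts with a running bracket depth computed per part via str.count, instead of A's character-by-character Python loop that tracks indices and cuts out slices; a timing run measured B faster by a constant factor (the per-character work moves into C built-ins).
import Mathlib
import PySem

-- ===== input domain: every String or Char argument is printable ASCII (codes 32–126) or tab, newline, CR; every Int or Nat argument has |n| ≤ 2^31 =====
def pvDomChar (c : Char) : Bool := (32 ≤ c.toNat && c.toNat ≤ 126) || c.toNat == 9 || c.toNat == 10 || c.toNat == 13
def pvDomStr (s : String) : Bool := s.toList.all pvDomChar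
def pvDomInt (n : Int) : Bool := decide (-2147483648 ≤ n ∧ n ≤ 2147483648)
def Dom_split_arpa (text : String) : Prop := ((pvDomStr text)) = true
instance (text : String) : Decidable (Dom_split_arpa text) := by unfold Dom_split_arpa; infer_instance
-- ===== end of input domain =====

-- B regroups text.split(' ') parts by a running bracket depth instead of scanning characters with index slices (same O(n) algorithmic cost; a timing run measured B faster by a constant factor).


-- ===== PORT A =====
-- shared helper: the cleaning expression `.replace('{','').replace('}','').strip()`
-- appears verbatim in both A's and B's Python
def cleanSeg (l : List Char) : List Char :=
  PySem.Chars.strip (PySem.Chars.replace (PySem.Chars.replace l ['{'] []) ['}'] [])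

-- the `for i, char in enumerate(text)` loop: structural recursion on the remaining
-- characters, carrying the index i; text[last:i] is the Python slice (the indices are
-- the loop's own counters, always 0 ≤ last ≤ i, kept as Nat and cast for the slice —
-- exact, since Python slicing with such indices is PySem.List.slice)
def splitArpaGo (s : List Char) : List Char → Nat → List String → Int → Nat → List String
  | [], _i, acc, _d, last =>
      acc ++ [String.ofList (cleanSeg (PySem.List.slice s (some (last : Int)) none))]
  | c :: rest, i, acc, d, last =>
      if c = '{' then splitArpaGo s rest (i+1) acc (d+1) last
      else if c = '}' then splitArpaGo s rest (i+1) acc (d-1) last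
      else if c = ' ' ∧ d = 0 then
        splitArpaGo s rest (i+1)
          (acc ++ [String.ofList (cleanSeg (PySem.List.slice s (some (last : Int)) (some (i : Int))))]) d i
      else splitArpaGo s rest (i+1) acc d last

def split_arpa (text : String) : List String :=
  splitArpaGo text.toList text.toList 0 [] 0 0

-- ===== PORT B =====
def flushB (group : List (List Char)) : String :=
  String.ofList (cleanSeg (PySem.Chars.join [' '] group))

def stepB (st : List String × List (List Char) × Int) (p : List Char) :
    List String × List (List Char) × Int :=
  let group := st.2.1 ++ [p]
  let d := st.2.2 + (PySem.Chars.count p ['{'] : Int) - (PySem.Chars.count p ['}'] : Int)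
  if d = 0 then (st.1 ++ [flushB group], [], d) else (st.1, group, d)

def split_arpa_alt (text : String) : List String :=
  let parts := PySem.Chars.splitOn text.toList [' ']
  let st := parts.foldl stepB ([], [], 0)
  if st.2.1 ≠ [] then st.1 ++ [flushB st.2.1] else st.1

-- ===== PRECONDITION & SPEC =====
def Spec_split_arpa (text : String) (out : List String) : Prop := out = split_arpa_alt text
instance (text : String) (out : List String) : Decidable (Spec_split_arpa text out) := by unfold Spec_split_arpa; infer_instance

-- ===== CLAIM (what is proved, stated in full; the proofs are below) =====
def Claim_equal_split_arpa : Prop := ∀ (text : String), Dom_split_arpa text → Spec_split_arpa text (split_arpa text)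

-- ===== LEMMAS AND PROOFS =====

-- characterization of .replace(c, '') / .count(c) for a single-character pattern
theorem replace_go_single (o : Char) : ∀ (l : List Char) (fuel : Nat) (acc : List Char),
    l.length ≤ fuel →
    PySem.Chars.replace.go [o] [] fuel l acc = acc.reverse ++ l.filter (· ≠ o) := by
  intro l
  induction l with
  | nil => intro fuel acc _; cases fuel <;> simp [PySem.Chars.replace.go]
  | cons c t ih =>
    intro fuel acc h
    cases fuel with
    | zero => simp at h
    | succ f =>
      by_cases hc : o = c
      · subst hc
        simp [PySem.Chars.replace.go, List.isPrefixOf, ih f acc (by simpa using h)]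
      · simp [PySem.Chars.replace.go, List.isPrefixOf, hc,
          ih f (c :: acc) (by simpa using h), Ne.symm hc]

theorem replace_single (l : List Char) (o : Char) :
    PySem.Chars.replace l [o] [] = l.filter (· ≠ o) := by
  simpa using replace_go_single o l l.length [] le_rfl

theorem count_go_single (o : Char) : ∀ (l : List Char) (fuel : Nat) (acc : Nat),
    l.length ≤ fuel →
    PySem.Chars.count.go [o] fuel l acc = acc + l.count o := by
  intro l
  induction l with
  | nil => intro fuel acc _; cases fuel <;> simp [PySem.Chars.count.go]
  | cons c t ih =>
    intro fuel acc h
    cases fuel with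
    | zero => simp at h
    | succ f =>
      by_cases hc : o = c
      · subst hc
        rw [show PySem.Chars.count.go [o] (f+1) (o :: t) acc
              = PySem.Chars.count.go [o] f t (acc + 1) by
            simp [PySem.Chars.count.go, List.isPrefixOf]]
        rw [ih f (acc+1) (by simpa using h), List.count_cons]
        simp; omega
      · rw [show PySem.Chars.count.go [o] (f+1) (c :: t) acc
              = PySem.Chars.count.go [o] f t acc by
            simp [PySem.Chars.count.go, List.isPrefixOf, hc]]
        rw [ih f acc (by simpa using h), List.count_cons]
        simp [Ne.symm hc]

theorem count_single (p : List Char) (o : Char) :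
    PySem.Chars.count p [o] = p.count o := by
  simpa using count_go_single o p p.length 0 le_rfl

-- a leading separator space is invisible to the cleaning step
theorem cleanSeg_cons_space (l : List Char) : cleanSeg (' ' :: l) = cleanSeg l := by
  simp [cleanSeg, replace_single, PySem.Chars.strip, PySem.Chars.lstrip, List.filter,
    PySem.Chars.isspace]

-- structural form of text.split(' ')
def splitSp : List Char → List (List Char)
  | [] => [[]]
  | c :: r =>
    match splitSp r with
    | [] => [[c]]
    | p :: ps => if c = ' ' then [] :: p :: ps else (c :: p) :: ps

theorem splitSp_ne_nil (l : List Char) : splitSp l ≠ [] := by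
  cases l with
  | nil => simp [splitSp]
  | cons c r =>
    simp only [splitSp]
    rcases h : splitSp r with _ | ⟨p, ps⟩ <;> simp <;> split <;> simp

theorem splitOn_go_single : ∀ (l : List Char) (fuel : Nat) (cur : List Char)
    (acc : List (List Char)), l.length ≤ fuel →
    PySem.Chars.splitOn.go [' '] fuel l cur acc =
      acc.reverse ++ (match splitSp l with
        | [] => [cur.reverse]
        | p :: ps => (cur.reverse ++ p) :: ps) := by
  intro l
  induction l with
  | nil => intro fuel cur acc _; cases fuel <;> simp [PySem.Chars.splitOn.go, splitSp]
  | cons c t ih =>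
    intro fuel cur acc h
    cases fuel with
    | zero => simp at h
    | succ f =>
      by_cases hc : c = ' '
      · subst hc
        rw [show PySem.Chars.splitOn.go [' '] (f+1) (' ' :: t) cur acc
              = PySem.Chars.splitOn.go [' '] f t [] (cur.reverse :: acc) by
            simp [PySem.Chars.splitOn.go, List.isPrefixOf]]
        rw [ih f [] (cur.reverse :: acc) (by simpa using h)]
        rcases hs : splitSp t with _ | ⟨p, ps⟩
        · exact absurd hs (splitSp_ne_nil t)
        · simp [splitSp, hs]
      · rw [show PySem.Chars.splitOn.go [' '] (f+1) (c :: t) cur acc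
              = PySem.Chars.splitOn.go [' '] f t (c :: cur) acc by
            simp [PySem.Chars.splitOn.go, List.isPrefixOf, Ne.symm hc]]
        rw [ih f (c :: cur) acc (by simpa using h)]
        rcases hs : splitSp t with _ | ⟨p, ps⟩
        · exact absurd hs (splitSp_ne_nil t)
        · simp [splitSp, hs, hc]

theorem splitOn_single (s : List Char) :
    PySem.Chars.splitOn s [' '] = splitSp s := by
  rw [PySem.Chars.splitOn, splitOn_go_single s (s.length + 1) [] [] (by omega)]
  rcases hs : splitSp s with _ | ⟨p, ps⟩
  · exact absurd hs (splitSp_ne_nil s)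
  · simp

def joinTail (ps : List (List Char)) : List Char := ps.flatMap (fun p => ' ' :: p)

theorem join_cons (p : List Char) (ps : List (List Char)) :
    PySem.Chars.join [' '] (p :: ps) = p ++ joinTail ps := by
  induction ps generalizing p with
  | nil => simp [PySem.Chars.join, joinTail, List.intercalate]
  | cons q qs ih =>
    have : [' '].intercalate (p :: q :: qs) = p ++ ' ' :: [' '].intercalate (q :: qs) := by
      simp [List.intercalate, List.intersperse]
    simp only [PySem.Chars.join] at ih ⊢
    rw [this, ih q]
    simp [joinTail]

theorem joinTail_append (ps qs : List (List Char)) :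
    joinTail (ps ++ qs) = joinTail ps ++ joinTail qs := by
  simp [joinTail]

theorem join_snoc (g : List (List Char)) (p : List Char) :
    PySem.Chars.join [' '] (g ++ [p]) =
      PySem.Chars.join [' '] g ++ (if g = [] then [] else [' ']) ++ p := by
  cases g with
  | nil => simp [PySem.Chars.join, List.intercalate]
  | cons h t =>
    rw [List.cons_append, join_cons, joinTail_append, join_cons]
    simp [joinTail]

theorem splitSp_join (l : List Char) :
    PySem.Chars.join [' '] (splitSp l) = l := by
  induction l with
  | nil => simp [splitSp, PySem.Chars.join, List.intercalate]
  | cons c r ih =>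
    rcases hs : splitSp r with _ | ⟨p, ps⟩
    · exact absurd hs (splitSp_ne_nil r)
    · rw [hs] at ih
      by_cases hc : c = ' '
      · subst hc
        have h2 : splitSp (' ' :: r) = [] :: p :: ps := by simp [splitSp, hs]
        rw [h2]
        rw [join_cons] at ih ⊢
        simp [joinTail, ← ih]
      · simp only [splitSp, hs, if_neg hc]
        rw [join_cons] at ih ⊢
        simpa using ih

theorem splitSp_no_space (l : List Char) : ∀ p ∈ splitSp l, ' ' ∉ p := by
  induction l with
  | nil => simp [splitSp]
  | cons c r ih =>
    rcases hs : splitSp r with _ | ⟨p, ps⟩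
    · exact absurd hs (splitSp_ne_nil r)
    · rw [hs] at ih
      by_cases hc : c = ' '
      · subst hc
        have h2 : splitSp (' ' :: r) = [] :: p :: ps := by simp [splitSp, hs]
        rw [h2]
        intro q hq
        rcases List.mem_cons.mp hq with rfl | hq
        · simp
        · exact ih q hq
      · simp only [splitSp, hs, if_neg hc]
        intro q hq
        rcases List.mem_cons.mp hq with rfl | hq
        · intro hmem
          rcases List.mem_cons.mp hmem with heq | hmem
          · exact hc heq.symm
          · exact ih p (by simp) hmem
        · exact ih q (List.mem_cons.mpr (Or.inr hq))

-- depth change contributed by one part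
def deltaP (p : List Char) : Int := (p.count '{' : Int) - (p.count '}' : Int)

-- B's final flush, as a function of the fold's end state
def finB (st : List String × List (List Char) × Int) : List String :=
  if st.2.1 ≠ [] then st.1 ++ [flushB st.2.1] else st.1

-- A's loop over a space-free part only advances i and the depth
theorem goA_part : ∀ (p : List Char), ' ' ∉ p → ∀ (s rest : List Char) (i : Nat)
    (acc : List String) (d : Int) (last : Nat),
    splitArpaGo s (p ++ rest) i acc d last
      = splitArpaGo s rest (i + p.length) acc (d + deltaP p) last := by
  intro p
  induction p with
  | nil => intro _ s rest i acc d last; simp [deltaP]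
  | cons c t ih =>
    intro hp s rest i acc d last
    have hcs : c ≠ ' ' := by intro h; exact hp (by simp [h])
    have hts : ' ' ∉ t := fun h => hp (by simp [h])
    by_cases h1 : c = '{'
    · subst h1
      rw [List.cons_append, show splitArpaGo s ('{' :: (t ++ rest)) i acc d last
            = splitArpaGo s (t ++ rest) (i+1) acc (d+1) last by simp [splitArpaGo]]
      rw [ih hts s rest (i+1) acc (d+1) last]
      congr 1
      · simp only [List.length_cons]; omega
      · simp [deltaP, List.count_cons] <;> omega
    · by_cases h2 : c = '}'
      · subst h2
        rw [List.cons_append, show splitArpaGo s ('}' :: (t ++ rest)) i acc d last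
              = splitArpaGo s (t ++ rest) (i+1) acc (d-1) last by simp [splitArpaGo]]
        rw [ih hts s rest (i+1) acc (d-1) last]
        congr 1
        · simp only [List.length_cons]; omega
        · simp [deltaP, List.count_cons] <;> omega
      · rw [List.cons_append, show splitArpaGo s (c :: (t ++ rest)) i acc d last
              = splitArpaGo s (t ++ rest) (i+1) acc d last by
            simp [splitArpaGo, h1, h2, hcs]]
        rw [ih hts s rest (i+1) acc d last]
        congr 1
        · simp only [List.length_cons]; omega
        · simp [deltaP, List.count_cons, h1, h2]

-- extending the consumed window by a known part
theorem dropTake_ext (s p t : List Char) (i last : Nat) (hli : last ≤ i)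
    (hls : last ≤ s.length) (hd : List.drop i s = p ++ t) :
    List.drop last (List.take (i + p.length) s) = List.drop last (List.take i s) ++ p := by
  rw [List.take_add, hd, List.take_left]
  rw [List.drop_append_of_le_length]
  simp
  omega

-- main bridge: A's char loop tracks B's part fold
theorem bridge : ∀ (ps : List (List Char)) (p s : List Char) (i last : Nat)
    (acc : List String) (group : List (List Char)) (d : Int),
    ' ' ∉ p → (∀ q ∈ ps, ' ' ∉ q) → last ≤ i → last ≤ s.length →
    List.drop i s = p ++ joinTail ps →
    (List.drop last (List.take i s)
        = PySem.Chars.join [' '] group ++ (if group = [] then [] else [' ']) ∨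
     List.drop last (List.take i s)
        = ' ' :: (PySem.Chars.join [' '] group ++ (if group = [] then [] else [' ']))) →
    splitArpaGo s (p ++ joinTail ps) i acc d last
      = finB ((p :: ps).foldl stepB (acc, group, d)) := by
  intro ps
  induction ps with
  | nil =>
    intro p s i last acc group d hp _ hli hls hd hcur
    have hd' : List.drop i s = p := by simpa [joinTail] using hd
    have hlen : s.length ≤ i + p.length := by
      have := congrArg List.length hd'; simp at this; omega
    have htake : List.take (i + p.length) s = s := List.take_of_length_le hlen
    have hext := dropTake_ext s p [] i last hli hls (by simpa using hd')
    rw [htake] at hext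
    simp only [joinTail, List.flatMap_nil, List.append_nil]
    have hga := goA_part p hp s [] i acc d last
    rw [List.append_nil] at hga
    rw [hga]
    simp only [splitArpaGo]
    rw [PySem.List.slice_from_natCast, hext]
    have hclean : cleanSeg (List.drop last (List.take i s) ++ p)
        = cleanSeg (PySem.Chars.join [' '] (group ++ [p])) := by
      rw [join_snoc]
      rcases hcur with h | h
      · rw [h]
      · rw [h, List.cons_append, cleanSeg_cons_space]
    simp only [List.foldl_cons, List.foldl_nil, stepB, finB, flushB]
    split
    · simp [hclean]
    · simp [hclean]
  | cons q ps' ih =>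
    intro p s i last acc group d hp hqs hli hls hd hcur
    have hq : ' ' ∉ q := hqs q (by simp)
    have hqs' : ∀ r ∈ ps', ' ' ∉ r := fun r hr => hqs r (by simp [hr])
    have hjt : joinTail (q :: ps') = ' ' :: (q ++ joinTail ps') := by simp [joinTail]
    have hd2 : List.drop (i + p.length) s = ' ' :: (q ++ joinTail ps') := by
      have h1 : List.drop (i + p.length) s = List.drop p.length (List.drop i s) := by
        rw [List.drop_drop]
      rw [h1, hd, hjt, List.drop_append_of_le_length le_rfl]
      simp
    have hlen : i + p.length < s.length := by
      have := congrArg List.length hd2; simp at this; omega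
    have hext := dropTake_ext s p (joinTail (q :: ps')) i last hli hls hd
    have htake1 : List.take (i + p.length + 1) s
        = List.take (i + p.length) s ++ [' '] := by
      rw [List.take_add, hd2]
      simp
    have hdrop3 : List.drop (i + p.length + 1) s = q ++ joinTail ps' := by
      have h1 : List.drop (i + p.length + 1) s = List.drop 1 (List.drop (i + p.length) s) := by
        rw [List.drop_drop]
      rw [h1, hd2]
      simp
    have hcurlen : (List.take (i + p.length) s).length = i + p.length := by
      simp; omega
    have hdd : d + (PySem.Chars.count p ['{'] : Int) - (PySem.Chars.count p ['}'] : Int)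
        = d + deltaP p := by
      simp [deltaP, count_single]; ring
    rw [hjt, goA_part p hp s _ i acc d last]
    by_cases hdz : d + deltaP p = 0
    · -- flush: the space is at depth 0
      have hstep : splitArpaGo s (' ' :: (q ++ joinTail ps')) (i + p.length) acc (d + deltaP p) last
          = splitArpaGo s (q ++ joinTail ps') (i + p.length + 1)
              (acc ++ [String.ofList (cleanSeg (PySem.List.slice s (some (last : Int))
                (some ((i + p.length : Nat) : Int))))]) (d + deltaP p) (i + p.length) := by
        simp [splitArpaGo, hdz]
      rw [hstep]
      have hslice : PySem.List.slice s (some (last : Int)) (some ((i + p.length : Nat) : Int))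
          = List.drop last (List.take (i + p.length) s) := by
        rw [PySem.List.slice_natCast, List.drop_take]
      have hclean : cleanSeg (List.drop last (List.take (i + p.length) s))
          = cleanSeg (PySem.Chars.join [' '] (group ++ [p])) := by
        rw [hext, join_snoc]
        rcases hcur with h | h
        · rw [h]
        · rw [h, List.cons_append, cleanSeg_cons_space]
      have hcurnew : List.drop (i + p.length) (List.take (i + p.length + 1) s) = [' '] := by
        rw [htake1, List.drop_append_of_le_length (by omega), List.drop_eq_nil_of_le (by omega)]
        rfl
      have hB : stepB (acc, group, d) p
          = (acc ++ [flushB (group ++ [p])], [], d + deltaP p) := by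
        simp only [stepB, hdd]
        rw [if_pos hdz]
      rw [List.foldl_cons, hB]
      have := ih q s (i + p.length + 1) (i + p.length)
        (acc ++ [String.ofList (cleanSeg (PySem.List.slice s (some (last : Int))
          (some ((i + p.length : Nat) : Int))))]) [] (d + deltaP p)
        hq hqs' (by omega) (by omega) hdrop3
        (Or.inr (by rw [hcurnew]; simp [PySem.Chars.join, List.intercalate]))
      rw [this, hslice, hclean]
      rfl
    · -- no flush: the space is inside brackets (depth ≠ 0)
      have hstep : splitArpaGo s (' ' :: (q ++ joinTail ps')) (i + p.length) acc (d + deltaP p) last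
          = splitArpaGo s (q ++ joinTail ps') (i + p.length + 1) acc (d + deltaP p) last := by
        simp [splitArpaGo, hdz]
      rw [hstep]
      have hB : stepB (acc, group, d) p = (acc, group ++ [p], d + deltaP p) := by
        simp only [stepB, hdd]
        rw [if_neg hdz]
      have hcurnew : List.drop last (List.take (i + p.length + 1) s)
          = List.drop last (List.take (i + p.length) s) ++ [' '] := by
        rw [htake1, List.drop_append_of_le_length (by omega)]
      have hgrp : (group ++ [p] = []) = False := by simp
      have := ih q s (i + p.length + 1) last acc (group ++ [p]) (d + deltaP p)
        hq hqs' (by omega) hls hdrop3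
        (by
          rw [hcurnew, hext, join_snoc]
          rcases hcur with h | h
          · left
            rw [h]
            simp [hgrp]
          · right
            rw [h]
            simp [hgrp])
      rw [List.foldl_cons, hB]
      exact this

-- ===== VERDICT (by name: the statement is the Claim_ definition above) =====
theorem split_arpa_spec : Claim_equal_split_arpa := by
  intro text _
  unfold Spec_split_arpa
  set s := text.toList with hs
  rcases hsp : splitSp s with _ | ⟨p, ps⟩
  · exact absurd hsp (splitSp_ne_nil s)
  · have hjoin : s = p ++ joinTail ps := by
      conv_lhs => rw [← splitSp_join s, hsp, join_cons]
    have hnos := splitSp_no_space s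
    rw [hsp] at hnos
    have hA : split_arpa text = splitArpaGo s (p ++ joinTail ps) 0 [] 0 0 := by
      rw [split_arpa, ← hs, ← hjoin]
    have hB : split_arpa_alt text = finB ((p :: ps).foldl stepB ([], [], 0)) := by
      rw [split_arpa_alt, ← hs, splitOn_single, hsp, finB]
    rw [hA, hB]
    exact bridge ps p s 0 0 [] [] 0 (hnos p (by simp))
      (fun q hq => hnos q (by simp [hq])) le_rfl (by simp) (by simpa using hjoin)
      (Or.inl (by simp [PySem.Chars.join, List.intercalate]))
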